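-- pv_equiv track=rewrite | github.com/Maryts2022/ephyra-chatbot | tts_preprocessing.py | number_to_greek
-- ===== SOURCE A (Python) =====
-- UNITS = {
--     0: "μηδέν", 1: "ένα", 2: "δύο", 3: "τρία", 4: "τέσσερα",
--     5: "πέντε", 6: "έξι", 7: "επτά", 8: "οκτώ", 9: "εννιά",
--     10: "δέκα", 11: "έντεκα", 12: "δώδεκα", 13: "δεκατρία",
--     14: "δεκατέσσερα", 15: "δεκαπέντε", 16: "δεκαέξι",
--     17: "δεκαεπτά", 18: "δεκαοκτώ", 19: "δεκαεννιά"
-- }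
--
-- TENS = {
--     20: "είκοσι", 30: "τριάντα", 40: "σαράντα", 50: "πενήντα",
--     60: "εξήντα", 70: "εβδομήντα", 80: "ογδόντα", 90: "ενενήντα"
-- }
--
-- HUNDREDS = {
--     100: "εκατό", 200: "διακόσια", 300: "τριακόσια", 400: "τετρακόσια",
--     500: "πεντακόσια", 600: "εξακόσια", 700: "επτακόσια",
--     800: "οκτακόσια", 900: "εννιακόσια"
-- }
--
-- def number_to_greek(n: int) -> str:
--     """
--     Μετατρέπει αριθμό σε ελληνική λέξη
--
--     Παραδείγματα:
--         15 → "δεκαπέντε"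
--         123 → "εκατόν είκοσι τρία"
--         1000 → "χίλια"
--     """
--     if n == 0:
--         return "μηδέν"
--
--     if n < 0:
--         return "μείον " + number_to_greek(-n)
--
--     # 1-19
--     if n < 20:
--         return UNITS[n]
--
--     # 20-99
--     if n < 100:
--         tens = (n // 10) * 10
--         units = n % 10
--         if units == 0:
--             return TENS[tens]
--         return f"{TENS[tens]} {UNITS[units]}"
--
--     # 100-999
--     if n < 1000:
--         hundreds = (n // 100) * 100
--         remainder = n % 100
--
--         if remainder == 0:
--             return HUNDREDS[hundreds]
--
--         if hundreds == 100:
--             return f"εκατόν {number_to_greek(remainder)}"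
--         else:
--             return f"{HUNDREDS[hundreds]} {number_to_greek(remainder)}"
--
--     # 1000-9999
--     if n < 10000:
--         thousands = n // 1000
--         remainder = n % 1000
--
--         if thousands == 1:
--             thousands_word = "χίλια"
--         elif thousands == 2:
--             thousands_word = "δύο χιλιάδες"
--         else:
--             thousands_word = f"{number_to_greek(thousands)} χιλιάδες"
--
--         if remainder == 0:
--             return thousands_word
--         return f"{thousands_word} {number_to_greek(remainder)}"
--
--     # 10000+
--     return str(n)  # Fallback για πολύ μεγάλους αριθμούς
-- ===== SOURCE B (Python) =====
-- # B: digit-split decomposition — split |n| into thousands/hundreds/under-100 digits,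
-- # build word fragments high-to-low in indexed lists, join with spaces (no recursion on remainders).
--
-- _UNITS = ["", "ένα", "δύο", "τρία", "τέσσερα", "πέντε", "έξι", "επτά", "οκτώ", "εννιά",
--           "δέκα", "έντεκα", "δώδεκα", "δεκατρία", "δεκατέσσερα", "δεκαπέντε", "δεκαέξι",
--           "δεκαεπτά", "δεκαοκτώ", "δεκαεννιά"]
-- _TENS = ["", "", "είκοσι", "τριάντα", "σαράντα", "πενήντα", "εξήντα", "εβδομήντα",
--          "ογδόντα", "ενενήντα"]
-- _HUNDREDS = ["", "εκατό", "διακόσια", "τριακόσια", "τετρακόσια", "πεντακόσια",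
--              "εξακόσια", "επτακόσια", "οκτακόσια", "εννιακόσια"]
--
--
-- def _under100(u):
--     # 1 <= u < 100
--     if u < 20:
--         return _UNITS[u]
--     t, d = divmod(u, 10)
--     return _TENS[t] + (" " + _UNITS[d] if d else "")
--
--
-- def _magnitude(m):
--     # m >= 1
--     if m >= 10000:
--         return str(m)
--     th, rest = divmod(m, 1000)
--     h, u = divmod(rest, 100)
--     frags = []
--     if th == 1:
--         frags.append("χίλια")
--     elif th == 2:
--         frags.append("δύο χιλιάδες")
--     elif th:
--         frags.append(_UNITS[th] + " χιλιάδες")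
--     if h:
--         frags.append("εκατόν" if h == 1 and u else _HUNDREDS[h])
--     if u:
--         frags.append(_under100(u))
--     return " ".join(frags)
--
--
-- def number_to_greek(n: int) -> str:
--     if n == 0:
--         return "μηδέν"
--     if n < 0:
--         return "μείον " + _magnitude(-n)
--     return _magnitude(n)
-- ===== Notes on version B (the rewrite author's own statement) =====
-- stated objective: alternative
-- what changed: Replaces A's recursion on remainders (re-dispatching through the full range ladder with dict lookups keyed by 20/300/...) by a single digit split of |n| into thousands/hundreds/under-100 digits, building word fragments high-to-low in digit-indexed lists and joining the collected fragments with spaces.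
import Mathlib
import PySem

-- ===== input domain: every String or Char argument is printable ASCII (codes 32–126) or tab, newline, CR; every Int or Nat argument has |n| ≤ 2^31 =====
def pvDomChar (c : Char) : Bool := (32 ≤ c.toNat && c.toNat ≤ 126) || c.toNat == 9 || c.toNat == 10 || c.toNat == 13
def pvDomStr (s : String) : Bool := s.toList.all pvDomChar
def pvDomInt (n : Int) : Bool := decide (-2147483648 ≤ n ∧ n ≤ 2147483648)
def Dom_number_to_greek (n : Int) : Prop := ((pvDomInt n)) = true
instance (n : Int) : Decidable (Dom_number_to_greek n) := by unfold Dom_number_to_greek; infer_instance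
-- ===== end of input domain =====

-- B replaces A's recursion on remainders by a digit split into thousands/hundreds/under-100
-- fragments joined with spaces (objective: alternative decomposition, same cost).

-- ===== PORT A =====
def UNITS : PySem.Dict Int String := PySem.Dict.ofList
  [(0, "μηδέν"), (1, "ένα"), (2, "δύο"), (3, "τρία"), (4, "τέσσερα"),
   (5, "πέντε"), (6, "έξι"), (7, "επτά"), (8, "οκτώ"), (9, "εννιά"),
   (10, "δέκα"), (11, "έντεκα"), (12, "δώδεκα"), (13, "δεκατρία"),
   (14, "δεκατέσσερα"), (15, "δεκαπέντε"), (16, "δεκαέξι"),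
   (17, "δεκαεπτά"), (18, "δεκαοκτώ"), (19, "δεκαεννιά")]

def TENS : PySem.Dict Int String := PySem.Dict.ofList
  [(20, "είκοσι"), (30, "τριάντα"), (40, "σαράντα"), (50, "πενήντα"),
   (60, "εξήντα"), (70, "εβδομήντα"), (80, "ογδόντα"), (90, "ενενήντα")]

def HUNDREDS : PySem.Dict Int String := PySem.Dict.ofList
  [(100, "εκατό"), (200, "διακόσια"), (300, "τριακόσια"), (400, "τετρακόσια"),
   (500, "πεντακόσια"), (600, "εξακόσια"), (700, "επτακόσια"),
   (800, "οκτακόσια"), (900, "εννιακόσια")]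

-- tiny hand-written decrease lemmas, cited by the port's decreasing_by (kept small on purpose)
theorem dec_neg_aux (n : Int) (h : n < 0) :
    2 * (-n).natAbs + (if -n < 0 then 1 else 0) < 2 * n.natAbs + (if n < 0 then 1 else 0) := by
  rw [Int.natAbs_neg, if_pos h, if_neg (not_lt.mpr (Int.neg_nonneg.mpr (le_of_lt h)))]
  exact Nat.lt_succ_self _

theorem dec_fmod_aux (n b : Int) (hb : 0 < b) (hn : b ≤ n) :
    2 * (n.fmod b).natAbs + (if n.fmod b < 0 then 1 else 0) <
      2 * n.natAbs + (if n < 0 then 1 else 0) := by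
  have hn0 : 0 ≤ n := le_trans (le_of_lt hb) hn
  have h0 : 0 ≤ n.fmod b := Int.fmod_nonneg hn0 (le_of_lt hb)
  have hna : (n.fmod b).natAbs < n.natAbs :=
    Int.natAbs_lt_natAbs_of_nonneg_of_lt h0 (lt_of_lt_of_le (Int.fmod_lt_of_pos n hb) hn)
  rw [if_neg (not_lt.mpr h0), if_neg (not_lt.mpr hn0), Nat.add_zero, Nat.add_zero]
  exact Nat.mul_lt_mul_of_le_of_lt (le_refl 2) hna (by norm_num)

theorem dec_fdiv_aux (n b : Int) (hb : 1 < b) (hn : b ≤ n) :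
    2 * (n.fdiv b).natAbs + (if n.fdiv b < 0 then 1 else 0) <
      2 * n.natAbs + (if n < 0 then 1 else 0) := by
  have hb0 : 0 ≤ b := le_of_lt (lt_trans one_pos hb)
  have hnpos : 0 < n := lt_of_lt_of_le (lt_trans one_pos hb) hn
  have he : n.fdiv b = n / b := Int.fdiv_eq_ediv_of_nonneg n hb0
  have h0 : 0 ≤ n.fdiv b := he ▸ Int.ediv_nonneg (le_of_lt hnpos) hb0
  have hlt : n.fdiv b < n := by
    rw [he]
    exact (Int.ediv_lt_iff_lt_mul (lt_trans one_pos hb)).mpr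
      ((lt_mul_iff_one_lt_right hnpos).mpr hb)
  have hna : (n.fdiv b).natAbs < n.natAbs :=
    Int.natAbs_lt_natAbs_of_nonneg_of_lt h0 hlt
  rw [if_neg (not_lt.mpr h0), if_neg (not_lt.mpr (le_of_lt hnpos)), Nat.add_zero, Nat.add_zero]
  exact Nat.mul_lt_mul_of_le_of_lt (le_refl 2) hna (by norm_num)

-- dict subscripts UNITS[...]/TENS[...]/HUNDREDS[...] always hit a present key here, so
-- Dict.getD with "" is exact (Python's KeyError is unreachable on every branch below)
def number_to_greek (n : Int) : String :=
  if n = 0 then "μηδέν"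
  else if n < 0 then "μείον " ++ number_to_greek (-n)
  else if n < 20 then UNITS.getD n ""
  else if n < 100 then
    let tens := (PySem.Int.floordiv n 10) * 10
    let units := PySem.Int.mod n 10
    if units = 0 then TENS.getD tens ""
    else TENS.getD tens "" ++ " " ++ UNITS.getD units ""
  else if n < 1000 then
    let hundreds := (PySem.Int.floordiv n 100) * 100
    let remainder := PySem.Int.mod n 100
    if remainder = 0 then HUNDREDS.getD hundreds ""
    else if hundreds = 100 then "εκατόν " ++ number_to_greek remainder
    else HUNDREDS.getD hundreds "" ++ " " ++ number_to_greek remainder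
  else if n < 10000 then
    let thousands := PySem.Int.floordiv n 1000
    let remainder := PySem.Int.mod n 1000
    let thousands_word :=
      if thousands = 1 then "χίλια"
      else if thousands = 2 then "δύο χιλιάδες"
      else number_to_greek thousands ++ " χιλιάδες"
    if remainder = 0 then thousands_word
    else thousands_word ++ " " ++ number_to_greek remainder
  else PySem.Int.toStr n
termination_by 2 * n.natAbs + (if n < 0 then 1 else 0)
decreasing_by
  all_goals try simp only [PySem.Int.mod, PySem.Int.floordiv]
  · exact dec_neg_aux n (by assumption)
  · exact dec_fmod_aux n 100 (by norm_num) (by omega)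
  · exact dec_fmod_aux n 100 (by norm_num) (by omega)
  · exact dec_fdiv_aux n 1000 (by norm_num) (by omega)
  · exact dec_fmod_aux n 1000 (by norm_num) (by omega)

-- ===== PORT B =====
def unitsB : List String :=
  ["", "ένα", "δύο", "τρία", "τέσσερα", "πέντε", "έξι", "επτά", "οκτώ", "εννιά",
   "δέκα", "έντεκα", "δώδεκα", "δεκατρία", "δεκατέσσερα", "δεκαπέντε", "δεκαέξι",
   "δεκαεπτά", "δεκαοκτώ", "δεκαεννιά"]

def tensB : List String :=
  ["", "", "είκοσι", "τριάντα", "σαράντα", "πενήντα", "εξήντα", "εβδομήντα",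
   "ογδόντα", "ενενήντα"]

def hundredsB : List String :=
  ["", "εκατό", "διακόσια", "τριακόσια", "τετρακόσια", "πεντακόσια",
   "εξακόσια", "επτακόσια", "οκτακόσια", "εννιακόσια"]

-- _under100(u), for 1 ≤ u < 100
def under100 (u : Int) : String :=
  if u < 20 then PySem.List.pyGetD unitsB u ""
  else
    let t := PySem.Int.floordiv u 10
    let d := PySem.Int.mod u 10
    PySem.List.pyGetD tensB t "" ++ (if d ≠ 0 then " " ++ PySem.List.pyGetD unitsB d "" else "")

-- the three conditional appends of Source B's frags loop, as fragment lists
def thfrag (th : Int) : List String :=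
  if th = 1 then ["χίλια"]
  else if th = 2 then ["δύο χιλιάδες"]
  else if th ≠ 0 then [PySem.List.pyGetD unitsB th "" ++ " χιλιάδες"]
  else []

def hfrag (h u : Int) : List String :=
  if h ≠ 0 then [if h = 1 ∧ u ≠ 0 then "εκατόν" else PySem.List.pyGetD hundredsB h ""] else []

def ufrag (u : Int) : List String :=
  if u ≠ 0 then [under100 u] else []

-- _magnitude(m), for m ≥ 1
def magnitude (m : Int) : String :=
  if 10000 ≤ m then PySem.Int.toStr m
  else
    let th := PySem.Int.floordiv m 1000
    let rest := PySem.Int.mod m 1000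
    let h := PySem.Int.floordiv rest 100
    let u := PySem.Int.mod rest 100
    PySem.Str.join " " (thfrag th ++ hfrag h u ++ ufrag u)

def number_to_greek_alt (n : Int) : String :=
  if n = 0 then "μηδέν"
  else if n < 0 then "μείον " ++ magnitude (-n)
  else magnitude n

-- ===== PRECONDITION & SPEC =====
def Spec_number_to_greek (n : Int) (out : String) : Prop := out = number_to_greek_alt n
instance (n : Int) (out : String) : Decidable (Spec_number_to_greek n out) := by unfold Spec_number_to_greek; infer_instance

-- ===== CLAIM (what is proved, stated in full; the proofs are below) =====
def Claim_equal_number_to_greek : Prop := ∀ (n : Int), Dom_number_to_greek n → Spec_number_to_greek n (number_to_greek n)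

-- ===== LEMMAS AND PROOFS =====

theorem join_one (a : String) : PySem.Str.join " " [a] = a := by
  simp [PySem.Str.join, PySem.Chars.join_singleton]

theorem join_two (a b : String) (l : List String) :
    PySem.Str.join " " (a :: b :: l) = a ++ " " ++ PySem.Str.join " " (b :: l) := by
  have h : ∀ cs : List Char, String.ofList (' ' :: cs) = " " ++ String.ofList cs := by
    intro cs
    rw [show (' ' :: cs) = [' '] ++ cs from rfl, String.ofList_append]
  simp [PySem.Str.join, PySem.Chars.join_cons_cons, String.ofList_append, String.append_assoc, h]

theorem join_cons_ne (a : String) (l : List String) (h : l ≠ []) :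
    PySem.Str.join " " (a :: l) = a ++ " " ++ PySem.Str.join " " l := by
  cases l with
  | nil => exact absurd rfl h
  | cons b t => exact join_two a b t

-- dict-vs-list table bridges, one digit at a time
theorem units_bridge (d : Int) (h1 : 1 ≤ d) (h2 : d < 20) :
    UNITS.getD d "" = PySem.List.pyGetD unitsB d "" := by
  interval_cases d <;> decide

theorem tens_bridge (t : Int) (h1 : 2 ≤ t) (h2 : t ≤ 9) :
    TENS.getD (t * 10) "" = PySem.List.pyGetD tensB t "" := by
  interval_cases t <;> decide

theorem hundreds_bridge (h : Int) (h1 : 1 ≤ h) (h2 : h ≤ 9) :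
    HUNDREDS.getD (h * 100) "" = PySem.List.pyGetD hundredsB h "" := by
  interval_cases h <;> decide

theorem A_under20 (u : Int) (h1 : 1 ≤ u) (h2 : u < 20) :
    number_to_greek u = UNITS.getD u "" := by
  rw [number_to_greek.eq_def]
  rw [if_neg (by omega), if_neg (by omega), if_pos h2]

theorem A_under100 (u : Int) (h1 : 1 ≤ u) (h2 : u < 100) :
    number_to_greek u = under100 u := by
  by_cases h20 : u < 20
  · rw [A_under20 u h1 h20, under100, if_pos h20, units_bridge u h1 h20]
  · have ht : PySem.Int.floordiv u 10 = u / 10 := by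
      simp [PySem.Int.floordiv, Int.fdiv_eq_ediv]
    have hd : PySem.Int.mod u 10 = u % 10 := by
      simp [PySem.Int.mod, Int.fmod_eq_emod]
    rw [number_to_greek.eq_def]
    rw [if_neg (by omega), if_neg (by omega), if_neg (by omega), if_pos h2]
    rw [under100, if_neg h20]
    simp only [ht, hd]
    have htb : TENS.getD (u / 10 * 10) "" = PySem.List.pyGetD tensB (u / 10) "" :=
      tens_bridge (u / 10) (by omega) (by omega)
    by_cases hz : u % 10 = 0
    · rw [if_pos hz, if_neg (by omega)]
      simp [htb]
    · rw [if_neg hz, if_pos hz, htb,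
        units_bridge (u % 10) (by omega) (by omega), String.append_assoc]

theorem hh_aux (r : Int) : PySem.Int.floordiv r 100 = r / 100 := by
  simp [PySem.Int.floordiv, Int.fdiv_eq_ediv]

theorem hu_aux (r : Int) : PySem.Int.mod r 100 = r % 100 := by
  simp [PySem.Int.mod, Int.fmod_eq_emod]

-- the hundreds + under-100 part: A on 1 ≤ r < 1000 equals the join of B's last two fragment lists
theorem A_sub1000 (r : Int) (h1 : 1 ≤ r) (h2 : r < 1000) :
    number_to_greek r =
      PySem.Str.join " "
        (hfrag (PySem.Int.floordiv r 100) (PySem.Int.mod r 100) ++ ufrag (PySem.Int.mod r 100)) := by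
  have hh : PySem.Int.floordiv r 100 = r / 100 := by
    simp [PySem.Int.floordiv, Int.fdiv_eq_ediv]
  have hu : PySem.Int.mod r 100 = r % 100 := by
    simp [PySem.Int.mod, Int.fmod_eq_emod]
  rw [hh, hu]
  by_cases h100 : r < 100
  · have hh0 : r / 100 = 0 := by omega
    have hu0 : r % 100 = r := by omega
    rw [hh0, hu0]
    simp only [hfrag, ufrag, if_neg (show ¬((0:Int) ≠ 0) from by omega),
      if_pos (show r ≠ 0 from by omega), List.nil_append]
    rw [join_one, A_under100 r h1 h100]
  · -- 100 ≤ r < 1000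
    rw [number_to_greek.eq_def]
    rw [if_neg (show ¬(r = 0) from by omega), if_neg (show ¬(r < 0) from by omega),
      if_neg (show ¬(r < 20) from by omega), if_neg h100, if_pos h2]
    simp only [hh, hu, hfrag, ufrag]
    have hb : HUNDREDS.getD (r / 100 * 100) "" = PySem.List.pyGetD hundredsB (r / 100) "" :=
      hundreds_bridge (r / 100) (by omega) (by omega)
    by_cases hz : r % 100 = 0
    · rw [if_pos hz, hz,
        if_pos (show r / 100 ≠ 0 from by omega),
        if_neg (show ¬(r / 100 = 1 ∧ (0:Int) ≠ 0) from by simp),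
        if_neg (show ¬((0:Int) ≠ 0) from by simp)]
      rw [List.append_nil, join_one, hb]
    · rw [if_neg hz,
        if_pos (show r / 100 ≠ 0 from by omega), if_pos hz]
      by_cases h1c : r / 100 * 100 = 100
      · rw [if_pos h1c, if_pos (show r / 100 = 1 ∧ r % 100 ≠ 0 from ⟨by omega, hz⟩)]
        simp only [List.cons_append, List.nil_append]
        rw [join_two, join_one, A_under100 (r % 100) (by omega) (by omega),
          show ("εκατόν" ++ " " : String) = "εκατόν " from by decide]
      · rw [if_neg h1c, if_neg (show ¬(r / 100 = 1 ∧ r % 100 ≠ 0) from by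
          rintro ⟨e, _⟩; omega)]
        simp only [List.cons_append, List.nil_append]
        rw [join_two, join_one, A_under100 (r % 100) (by omega) (by omega), hb,
          String.append_assoc]

theorem A_pos (m : Int) (h1 : 1 ≤ m) : number_to_greek m = magnitude m := by
  by_cases hbig : 10000 ≤ m
  · rw [number_to_greek.eq_def, magnitude, if_pos hbig]
    rw [if_neg (show ¬(m = 0) from by omega), if_neg (show ¬(m < 0) from by omega),
      if_neg (show ¬(m < 20) from by omega), if_neg (show ¬(m < 100) from by omega),
      if_neg (show ¬(m < 1000) from by omega), if_neg (show ¬(m < 10000) from by omega)]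
  · rw [magnitude, if_neg hbig]
    have hth : PySem.Int.floordiv m 1000 = m / 1000 := by
      simp [PySem.Int.floordiv, Int.fdiv_eq_ediv]
    have hre : PySem.Int.mod m 1000 = m % 1000 := by
      simp [PySem.Int.mod, Int.fmod_eq_emod]
    simp only [hth, hre]
    by_cases hk : m < 1000
    · have h0 : m / 1000 = 0 := by omega
      have hm : m % 1000 = m := by omega
      rw [h0, hm]
      simp only [thfrag, if_neg (show ¬((0:Int) = 1) from by omega),
        if_neg (show ¬((0:Int) = 2) from by omega), if_neg (show ¬((0:Int) ≠ 0) from by simp),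
        List.nil_append]
      exact A_sub1000 m h1 hk
    · -- 1000 ≤ m < 10000
      rw [number_to_greek.eq_def]
      rw [if_neg (show ¬(m = 0) from by omega), if_neg (show ¬(m < 0) from by omega),
        if_neg (show ¬(m < 20) from by omega), if_neg (show ¬(m < 100) from by omega),
        if_neg (show ¬(m < 1000) from by omega), if_pos (show m < 10000 from by omega)]
      simp only [hth, hre]
      have htw :
          (if m / 1000 = 1 then "χίλια"
           else if m / 1000 = 2 then "δύο χιλιάδες"
           else number_to_greek (m / 1000) ++ " χιλιάδες") =
          (if m / 1000 = 1 then "χίλια"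
           else if m / 1000 = 2 then "δύο χιλιάδες"
           else PySem.List.pyGetD unitsB (m / 1000) "" ++ " χιλιάδες") := by
        by_cases e1 : m / 1000 = 1
        · rw [if_pos e1, if_pos e1]
        · by_cases e2 : m / 1000 = 2
          · rw [if_neg e1, if_neg e1, if_pos e2, if_pos e2]
          · rw [if_neg e1, if_neg e1, if_neg e2, if_neg e2,
              A_under20 (m / 1000) (by omega) (by omega),
              units_bridge (m / 1000) (by omega) (by omega)]
      have hfragth : thfrag (m / 1000) =
          [if m / 1000 = 1 then "χίλια"
           else if m / 1000 = 2 then "δύο χιλιάδες"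
           else PySem.List.pyGetD unitsB (m / 1000) "" ++ " χιλιάδες"] := by
        simp only [thfrag]
        by_cases e1 : m / 1000 = 1
        · rw [if_pos e1, if_pos e1]
        · by_cases e2 : m / 1000 = 2
          · rw [if_neg e1, if_pos e2, if_neg e1, if_pos e2]
          · rw [if_neg e1, if_neg e2, if_pos (show m / 1000 ≠ 0 from by omega),
              if_neg e1, if_neg e2]
      rw [htw, hfragth]
      by_cases hz : m % 1000 = 0
      · rw [if_pos hz, hz]
        have hz1 : PySem.Int.floordiv (0:Int) 100 = 0 := by decide
        have hz2 : PySem.Int.mod (0:Int) 100 = 0 := by decide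
        rw [hz1, hz2]
        simp only [hfrag, ufrag, if_neg (show ¬((0:Int) ≠ 0) from by simp), List.append_nil]
        rw [join_one]
      · rw [if_neg hz]
        rw [A_sub1000 (m % 1000) (by omega) (by omega)]
        have hne : hfrag (PySem.Int.floordiv (m % 1000) 100) (PySem.Int.mod (m % 1000) 100) ++
            ufrag (PySem.Int.mod (m % 1000) 100) ≠ [] := by
          rw [hh_aux, hu_aux]
          simp only [hfrag, ufrag]
          by_cases hc : m % 1000 % 100 = 0
          · rw [if_pos (show m % 1000 / 100 ≠ 0 from by omega)]
            simp
          · rw [if_pos hc]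
            simp
        simp only [List.cons_append, List.nil_append]
        rw [join_cons_ne _ _ hne]

-- ===== VERDICT (by name: the statement is the Claim_ definition above) =====
theorem number_to_greek_spec : Claim_equal_number_to_greek := by
  intro n _
  unfold Spec_number_to_greek number_to_greek_alt
  by_cases h0 : n = 0
  · rw [if_pos h0, h0, number_to_greek.eq_def, if_pos rfl]
  · rw [if_neg h0]
    by_cases hneg : n < 0
    · rw [if_pos hneg, number_to_greek.eq_def, if_neg h0, if_pos hneg,
        A_pos (-n) (by omega)]
    · rw [if_neg hneg]
      exact A_pos n (by omega)
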